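-- pv_equiv track=rewrite | github.com/SLP25/aeonius | language/utils.py | clean_identifier
-- ===== SOURCE A (Python) =====
-- def clean_identifier(identifier: str):
--     replacement_table = {
--         "*": "times",
--         "+": "plus",
--         "-": "minus",
--         "/": "div",
--         "%": "mod",
--         "<": "lt",
--         "=": "eq",
--         ">": "gt",
--         "$": "dollar",
--         "^": "power",
--         ".": "dot",
--         "&": "nd",
--         "|": "ou",
--         "!": "excl"
--     }
--
--     for key in replacement_table.keys():
--         identifier = identifier.replace(key, replacement_table[key])
--
--     return identifier
-- ===== SOURCE B (Python) =====
-- def _word_for(c):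
--     if c == '*': return 'times'
--     elif c == '+': return 'plus'
--     elif c == '-': return 'minus'
--     elif c == '/': return 'div'
--     elif c == '%': return 'mod'
--     elif c == '<': return 'lt'
--     elif c == '=': return 'eq'
--     elif c == '>': return 'gt'
--     elif c == '$': return 'dollar'
--     elif c == '^': return 'power'
--     elif c == '.': return 'dot'
--     elif c == '&': return 'nd'
--     elif c == '|': return 'ou'
--     elif c == '!': return 'excl'
--     else: return c
--
-- def clean_identifier(identifier: str):
--     pieces = []
--     for c in identifier:
--         pieces.append(_word_for(c))
--     return ''.join(pieces)
-- ===== Notes on version B (the rewrite author's own statement) =====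
-- stated objective: alternative
-- what changed: B makes one pass over the characters, mapping each character to its word via an if/elif chain and joining the accumulated pieces, instead of A's fourteen full str.replace scans over the whole string (exact because no replacement word contains a key character).
import Mathlib
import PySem

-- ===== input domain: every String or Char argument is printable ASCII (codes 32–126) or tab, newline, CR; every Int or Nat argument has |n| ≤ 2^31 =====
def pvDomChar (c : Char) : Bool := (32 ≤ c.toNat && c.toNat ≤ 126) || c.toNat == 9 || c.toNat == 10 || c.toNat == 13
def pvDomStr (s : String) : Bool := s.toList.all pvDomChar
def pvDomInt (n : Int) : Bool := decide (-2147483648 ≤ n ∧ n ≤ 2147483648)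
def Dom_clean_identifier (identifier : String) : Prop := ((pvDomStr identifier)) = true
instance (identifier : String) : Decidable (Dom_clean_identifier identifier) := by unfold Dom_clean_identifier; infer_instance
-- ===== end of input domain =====

-- B makes one pass over the characters, classifying each by an if/elif chain and joining
-- the accumulated pieces, instead of A's fourteen whole-string str.replace passes
-- (objective: alternative single-pass algorithm; exact because no word contains a key).

-- ===== PORT A =====
-- the dict's items in insertion order; A loops over its keys and replaces each in turn
def cleanTableA : List (String × String) :=
  [("*", "times"), ("+", "plus"), ("-", "minus"), ("/", "div"), ("%", "mod"),
   ("<", "lt"), ("=", "eq"), (">", "gt"), ("$", "dollar"), ("^", "power"),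
   (".", "dot"), ("&", "nd"), ("|", "ou"), ("!", "excl")]

def clean_identifier (identifier : String) : String :=
  cleanTableA.foldl (fun id kv => PySem.Str.replace id kv.1 kv.2) identifier

-- ===== PORT B =====
-- Source B's _word_for: an if/elif chain from character to word
def wordFor (c : Char) : String :=
  if c = '*' then "times"
  else if c = '+' then "plus"
  else if c = '-' then "minus"
  else if c = '/' then "div"
  else if c = '%' then "mod"
  else if c = '<' then "lt"
  else if c = '=' then "eq"
  else if c = '>' then "gt"
  else if c = '$' then "dollar"
  else if c = '^' then "power"
  else if c = '.' then "dot"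
  else if c = '&' then "nd"
  else if c = '|' then "ou"
  else if c = '!' then "excl"
  else String.singleton c

-- Source B's loop: append each piece to an accumulator, then ''.join
def clean_identifier_alt (identifier : String) : String :=
  PySem.Str.join ""
    ((identifier.toList.foldl (fun pieces c => wordFor c :: pieces) []).reverse)

-- ===== PRECONDITION & SPEC =====
def Spec_clean_identifier (identifier : String) (out : String) : Prop := out = clean_identifier_alt identifier
instance (identifier : String) (out : String) : Decidable (Spec_clean_identifier identifier out) := by unfold Spec_clean_identifier; infer_instance

-- ===== CLAIM (what is proved, stated in full; the proofs are below) =====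
def Claim_equal_clean_identifier : Prop := ∀ (identifier : String), Dom_clean_identifier identifier → Spec_clean_identifier identifier (clean_identifier identifier)

-- ===== LEMMAS AND PROOFS =====

-- replacing a single-character pattern is a per-character expansion
def pvExpand (k : Char) (v : List Char) (l : List Char) : List Char :=
  l.flatMap (fun c => if c = k then v else [c])

theorem pvExpand_append (k : Char) (v a b : List Char) :
    pvExpand k v (a ++ b) = pvExpand k v a ++ pvExpand k v b := by
  simp [pvExpand]

theorem pv_go_single (k : Char) (v : List Char) :
    ∀ (fuel : Nat) (l acc : List Char), l.length ≤ fuel →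
      PySem.Chars.replace.go [k] v fuel l acc = acc.reverse ++ pvExpand k v l := by
  intro fuel
  induction fuel with
  | zero =>
    intro l acc h
    have : l = [] := List.eq_nil_of_length_eq_zero (Nat.le_zero.mp h)
    subst this
    simp [PySem.Chars.replace.go, pvExpand]
  | succ n ih =>
    intro l acc h
    cases l with
    | nil => simp [PySem.Chars.replace.go, pvExpand]
    | cons c t =>
      rw [PySem.Chars.replace.go]
      by_cases hc : c = k
      · subst hc
        have hp : List.isPrefixOf [c] (c :: t) = true := by
          simp [List.isPrefixOf]
        rw [if_pos hp]
        rw [show List.drop [c].length (c :: t) = t from by simp]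
        rw [ih t (v.reverse ++ acc) (by simpa using Nat.lt_succ_iff.mp (by simpa using h))]
        simp [pvExpand]
      · have hp : List.isPrefixOf [k] (c :: t) = false := by
          simp [List.isPrefixOf]
          exact fun hh => (hc hh.symm).elim
        rw [if_neg (by simp [hp])]
        rw [ih t (c :: acc) (by simpa using Nat.lt_succ_iff.mp (by simpa using h))]
        simp [pvExpand, hc]

theorem pv_replace_single (k : Char) (v l : List Char) :
    PySem.Chars.replace l [k] v = pvExpand k v l := by
  rw [PySem.Chars.replace]
  simp [pv_go_single k v l.length l [] (le_refl _)]

-- the character-level table used to describe A's fold of replaces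
def pvTableC : List (Char × List Char) :=
  [('*', "times".toList), ('+', "plus".toList), ('-', "minus".toList), ('/', "div".toList),
   ('%', "mod".toList), ('<', "lt".toList), ('=', "eq".toList), ('>', "gt".toList),
   ('$', "dollar".toList), ('^', "power".toList), ('.', "dot".toList), ('&', "nd".toList),
   ('|', "ou".toList), ('!', "excl".toList)]

def pvApply (l : List Char) : List Char :=
  pvTableC.foldl (fun l kv => pvExpand kv.1 kv.2 l) l

theorem pvApply_append (a b : List Char) : pvApply (a ++ b) = pvApply a ++ pvApply b := by
  simp [pvApply, pvTableC, List.foldl, pvExpand_append]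

theorem pvApply_nil : pvApply [] = [] := by decide

theorem pvApply_single (c : Char) : pvApply [c] = (wordFor c).toList := by
  by_cases h1 : c = '*'; · subst h1; decide
  by_cases h2 : c = '+'; · subst h2; decide
  by_cases h3 : c = '-'; · subst h3; decide
  by_cases h4 : c = '/'; · subst h4; decide
  by_cases h5 : c = '%'; · subst h5; decide
  by_cases h6 : c = '<'; · subst h6; decide
  by_cases h7 : c = '='; · subst h7; decide
  by_cases h8 : c = '>'; · subst h8; decide
  by_cases h9 : c = '$'; · subst h9; decide
  by_cases h10 : c = '^'; · subst h10; decide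
  by_cases h11 : c = '.'; · subst h11; decide
  by_cases h12 : c = '&'; · subst h12; decide
  by_cases h13 : c = '|'; · subst h13; decide
  by_cases h14 : c = '!'; · subst h14; decide
  have l : pvApply [c] = [c] := by
    simp [pvApply, pvTableC, List.foldl, pvExpand, h1, h2, h3, h4, h5, h6, h7, h8, h9,
      h10, h11, h12, h13, h14]
  have r : (wordFor c).toList = [c] := by
    simp [wordFor, h1, h2, h3, h4, h5, h6, h7, h8, h9, h10, h11, h12, h13, h14,
      String.singleton]
  rw [l, r]

theorem pvApply_eq_flatMap (l : List Char) :
    pvApply l = l.flatMap (fun c => (wordFor c).toList) := by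
  induction l with
  | nil => simpa using pvApply_nil
  | cons c t ih =>
    have : (c :: t) = [c] ++ t := rfl
    rw [this, pvApply_append, pvApply_single, ih]
    simp

theorem pv_join_nil_flatten (cs : List (List Char)) : PySem.Chars.join [] cs = cs.flatten := by
  show List.intercalate [] cs = cs.flatten
  induction cs with
  | nil => rfl
  | cons h t ih =>
    cases t with
    | nil => simp [List.intercalate]
    | cons h2 t2 =>
      simp only [List.intercalate, List.intersperse] at ih ⊢
      simp_all

theorem pvA_toList (s : String) :
    (clean_identifier s).toList = pvApply s.toList := by
  simp only [clean_identifier, cleanTableA, pvApply, pvTableC, List.foldl,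
    PySem.Str.toList_replace]
  simp only [show ("*":String).toList = ['*'] from by decide, show ("+":String).toList = ['+'] from by decide, show ("-":String).toList = ['-'] from by decide, show ("/":String).toList = ['/'] from by decide, show ("%":String).toList = ['%'] from by decide, show ("<":String).toList = ['<'] from by decide, show ("=":String).toList = ['='] from by decide, show (">":String).toList = ['>'] from by decide, show ("$":String).toList = ['$'] from by decide, show ("^":String).toList = ['^'] from by decide, show (".":String).toList = ['.'] from by decide, show ("&":String).toList = ['&'] from by decide, show ("|":String).toList = ['|'] from by decide, show ("!":String).toList = ['!'] from by decide]
  norm_num [pv_replace_single]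

-- B's accumulate-then-reverse loop produces the list of pieces in order
theorem pv_foldl_cons_rev {α β : Type} (f : α → β) :
    ∀ (l : List α) (acc : List β),
      (l.foldl (fun acc c => f c :: acc) acc).reverse = acc.reverse ++ l.map f := by
  intro l
  induction l with
  | nil => simp
  | cons c t ih => intro acc; simp [List.foldl]

theorem pvB_toList (s : String) :
    (clean_identifier_alt s).toList = s.toList.flatMap (fun c => (wordFor c).toList) := by
  simp only [clean_identifier_alt, PySem.Str.toList_join]
  rw [show ("" : String).toList = [] from rfl, pv_join_nil_flatten]
  rw [show (s.toList.foldl (fun pieces c => wordFor c :: pieces) []) =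
        (s.toList.foldl (fun pieces c => wordFor c :: pieces) ([] : List String)) from rfl]
  rw [pv_foldl_cons_rev (fun c => wordFor c) s.toList []]
  simp [List.flatMap, Function.comp_def]

-- ===== VERDICT (by name: the statement is the Claim_ definition above) =====
theorem clean_identifier_spec : Claim_equal_clean_identifier := by
  intro s _
  show clean_identifier s = clean_identifier_alt s
  rw [← String.toList_inj, pvA_toList, pvB_toList, pvApply_eq_flatMap]
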